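-- pv_equiv track=rewrite | github.com/est2mzd/video_editing | src/submit_baseline_ver05.py | build_tool_chain
-- ===== SOURCE A (Python) =====
-- from typing import Any
--
-- TOOL_PRIORITY = ["opencv", "raft", "vace", "wan"]
--
-- def _tool_rank(tool: str) -> int:
--     return TOOL_PRIORITY.index(tool) if tool in TOOL_PRIORITY else 999
--
-- def build_tool_chain(rule: dict[str, Any]) -> list[tuple[str, str]]:
--     primary_tool = str(rule.get("primary_tool", "opencv"))
--     primary_method = str(rule.get("method", "identity"))
--     secondary_tool = str(rule.get("secondary_tool", "raft"))
--     secondary_method = str(rule.get("secondary_method", "identity"))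
--
--     ordered = sorted(
--         [(primary_tool, primary_method), (secondary_tool, secondary_method)],
--         key=lambda x: _tool_rank(x[0]),
--     )
--
--     uniq: list[tuple[str, str]] = []
--     seen: set[str] = set()
--     for tool, method in ordered:
--         if tool in seen:
--             continue
--         seen.add(tool)
--         uniq.append((tool, method))
--     return uniq[:2]
-- ===== SOURCE B (Python) =====
-- TOOL_PRIORITY = ["opencv", "raft", "vace", "wan"]
--
-- def _tool_rank(tool: str) -> int:
--     return TOOL_PRIORITY.index(tool) if tool in TOOL_PRIORITY else 999
--
-- def build_tool_chain(rule):
--     primary = (str(rule.get("primary_tool", "opencv")), str(rule.get("method", "identity")))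
--     secondary = (str(rule.get("secondary_tool", "raft")), str(rule.get("secondary_method", "identity")))
--     if _tool_rank(secondary[0]) < _tool_rank(primary[0]):
--         first, second = secondary, primary
--     else:
--         first, second = primary, secondary
--     if second[0] == first[0]:
--         return [first]
--     return [first, second]
-- ===== Notes on version B (the rewrite author's own statement) =====
-- stated objective: simpler
-- what changed: Replaces the sort-then-seen-set-dedup-then-slice pipeline with a single rank comparison choosing which pair goes first (strict < preserves the stable sort's tie order) and one tool-equality check deciding whether the second pair is kept.
import Mathlib
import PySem

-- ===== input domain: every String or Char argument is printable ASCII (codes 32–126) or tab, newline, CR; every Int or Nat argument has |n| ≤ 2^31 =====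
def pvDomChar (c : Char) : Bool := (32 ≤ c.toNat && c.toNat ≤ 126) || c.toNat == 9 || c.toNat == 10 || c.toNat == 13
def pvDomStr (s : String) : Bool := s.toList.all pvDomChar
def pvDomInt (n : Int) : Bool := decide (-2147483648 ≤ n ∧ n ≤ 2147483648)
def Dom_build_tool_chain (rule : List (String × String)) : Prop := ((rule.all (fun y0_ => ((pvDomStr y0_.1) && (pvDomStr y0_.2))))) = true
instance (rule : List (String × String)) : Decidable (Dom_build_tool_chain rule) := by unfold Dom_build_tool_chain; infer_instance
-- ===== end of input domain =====

-- ===== PORT A =====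
-- B replaces A's sort/seen-set/slice pipeline by one rank comparison and one tool-equality check; same return value.
def TOOL_PRIORITY : List String := ["opencv", "raft", "vace", "wan"]

def _tool_rank (tool : String) : Int :=
  -- TOOL_PRIORITY.index(tool) if tool in TOOL_PRIORITY else 999
  match PySem.List.index? TOOL_PRIORITY tool with
  | some i => (i : Int)
  | none => 999

def build_tool_chain (rule : List (String × String)) : List (String × String) :=
  let primary_tool := PySem.Dict.getD ⟨rule⟩ "primary_tool" "opencv"
  let primary_method := PySem.Dict.getD ⟨rule⟩ "method" "identity"
  let secondary_tool := PySem.Dict.getD ⟨rule⟩ "secondary_tool" "raft"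
  let secondary_method := PySem.Dict.getD ⟨rule⟩ "secondary_method" "identity"
  let ordered := PySem.List.sorted [(primary_tool, primary_method), (secondary_tool, secondary_method)]
      (fun x => _tool_rank x.1) false
  let acc := ordered.foldl
      (fun (acc : List (String × String) × PySem.Set String) p =>
        if PySem.Set.contains acc.2 p.1 then acc
        else (acc.1 ++ [p], PySem.Set.add acc.2 p.1))
      ([], PySem.Set.empty)
  PySem.List.slice acc.1 none (some 2)

-- ===== PORT B =====
def build_tool_chain_alt (rule : List (String × String)) : List (String × String) :=
  let primary := (PySem.Dict.getD ⟨rule⟩ "primary_tool" "opencv",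
                  PySem.Dict.getD ⟨rule⟩ "method" "identity")
  let secondary := (PySem.Dict.getD ⟨rule⟩ "secondary_tool" "raft",
                    PySem.Dict.getD ⟨rule⟩ "secondary_method" "identity")
  let fs := if _tool_rank secondary.1 < _tool_rank primary.1 then (secondary, primary)
            else (primary, secondary)
  if fs.2.1 == fs.1.1 then [fs.1] else [fs.1, fs.2]

-- ===== PRECONDITION & SPEC =====
def Spec_build_tool_chain (rule : List (String × String)) (out : List (String × String)) : Prop := out = build_tool_chain_alt rule
instance (rule : List (String × String)) (out : List (String × String)) : Decidable (Spec_build_tool_chain rule out) := by unfold Spec_build_tool_chain; infer_instance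

-- ===== CLAIM (what is proved, stated in full; the proofs are below) =====
def Claim_equal_build_tool_chain : Prop := ∀ (rule : List (String × String)), Dom_build_tool_chain rule → Spec_build_tool_chain rule (build_tool_chain rule)

-- ===== LEMMAS AND PROOFS =====
-- dedup of a concrete two-element list: the seen-set loop keeps the second pair iff its tool differs
lemma dedup2 (a b : String × String) :
    (PySem.List.slice
      (([a, b].foldl
        (fun (acc : List (String × String) × PySem.Set String) q =>
          if PySem.Set.contains acc.2 q.1 then acc
          else (acc.1 ++ [q], PySem.Set.add acc.2 q.1))
        ([], PySem.Set.empty)).1) none (some 2)) =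
    (if b.1 == a.1 then [a] else [a, b]) := by
  by_cases he : b.1 = a.1 <;>
    simp [PySem.Set.contains, PySem.Set.add, PySem.Set.empty, he,
          PySem.List.slice_to, List.take]

lemma core_eq (p s : String × String) :
    (PySem.List.slice
      (((PySem.List.sorted [p, s] (fun x => _tool_rank x.1) false).foldl
        (fun (acc : List (String × String) × PySem.Set String) q =>
          if PySem.Set.contains acc.2 q.1 then acc
          else (acc.1 ++ [q], PySem.Set.add acc.2 q.1))
        ([], PySem.Set.empty)).1) none (some 2)) =
    (if (if _tool_rank s.1 < _tool_rank p.1 then (s, p) else (p, s)).2.1 ==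
        (if _tool_rank s.1 < _tool_rank p.1 then (s, p) else (p, s)).1.1
     then [(if _tool_rank s.1 < _tool_rank p.1 then (s, p) else (p, s)).1]
     else [(if _tool_rank s.1 < _tool_rank p.1 then (s, p) else (p, s)).1,
           (if _tool_rank s.1 < _tool_rank p.1 then (s, p) else (p, s)).2]) := by
  have hsort : PySem.List.sorted [p, s] (fun x => _tool_rank x.1) false =
      if _tool_rank s.1 < _tool_rank p.1 then [s, p] else [p, s] := by
    simp [PySem.List.sorted, PySem.List.insertBy]
  rw [hsort]
  by_cases h : _tool_rank s.1 < _tool_rank p.1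
  · simp only [if_pos h]; exact dedup2 s p
  · simp only [if_neg h]; exact dedup2 p s

-- ===== VERDICT (by name: the statement is the Claim_ definition above) =====
theorem build_tool_chain_spec : Claim_equal_build_tool_chain := by
  intro rule _
  unfold Spec_build_tool_chain build_tool_chain build_tool_chain_alt
  exact core_eq _ _
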